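-- pv_equiv track=rewrite | github.com/ArmandAgopian/advent-of-code | 2023/04/solution.py | part1
-- ===== SOURCE A (Python) =====
-- def part1(lines):
--     value = 0
--
--     for line in lines:
--         winning_nums = set(line.split(":")[1].split("|")[0].split())
--         nums = set(line.split(":")[1].split("|")[1].split())
--         actual_wins = winning_nums & nums
--         if actual_wins:
--             value += 2 ** (len(actual_wins) - 1)
--
--     return value
-- ===== SOURCE B (Python) =====
-- def part1(lines):
--     total = 0
--     for line in lines:
--         fields = line.split(":")[1].split("|")
--         winning = set(fields[0].split())
--         score = 0
--         for tok in set(fields[1].split()):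
--             if tok in winning:
--                 score = 1 if score == 0 else score * 2
--         total += score
--     return total
-- ===== Notes on version B (the rewrite author's own statement) =====
-- stated objective: alternative
-- what changed: B never materializes the intersection set: it keeps one winning-number set and scores each card by an accumulator-doubling pass over the deduplicated own numbers (score=1 on first match, doubled on each further match) instead of the closed-form 2**(len(winning&own)-1).
import Mathlib
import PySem

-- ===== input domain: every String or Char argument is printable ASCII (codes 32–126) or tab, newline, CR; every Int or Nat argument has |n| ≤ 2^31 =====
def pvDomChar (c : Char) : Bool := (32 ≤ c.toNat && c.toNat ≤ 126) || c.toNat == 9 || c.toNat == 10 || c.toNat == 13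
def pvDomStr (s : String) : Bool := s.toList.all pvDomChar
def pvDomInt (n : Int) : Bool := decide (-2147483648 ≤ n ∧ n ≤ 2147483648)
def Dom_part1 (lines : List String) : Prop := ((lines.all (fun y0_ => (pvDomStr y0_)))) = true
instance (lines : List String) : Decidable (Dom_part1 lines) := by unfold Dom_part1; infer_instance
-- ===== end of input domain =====

-- B replaces the intersection set + closed-form 2^(k-1) score by an accumulator-doubling pass
-- over the deduplicated own numbers; same cost, alternative decomposition (return value only).

-- ===== PORT A =====
-- line.split(":")[1]  (raises if no ":"; Pre_ guarantees the index is in range, so getD/pyGetD are exact)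
def pvRest (line : String) : String :=
  PySem.List.pyGetD ((PySem.Str.split? line ":").getD []) 1 ""

-- line.split(":")[1].split("|")
def pvFields (line : String) : List String :=
  (PySem.Str.split? (pvRest line) "|").getD []

def part1 (lines : List String) : Int :=
  lines.foldl (fun value line =>
    let winning_nums : PySem.Set String :=
      PySem.Set.ofList (PySem.Str.split₀ (PySem.List.pyGetD (pvFields line) 0 ""))
    let nums : PySem.Set String :=
      PySem.Set.ofList (PySem.Str.split₀ (PySem.List.pyGetD (pvFields line) 1 ""))
    let actual_wins := PySem.Set.inter winning_nums nums
    if actual_wins ≠ [] then value + 2 ^ (actual_wins.length - 1) else value) 0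

-- ===== PORT B =====
def part1_alt (lines : List String) : Int :=
  lines.foldl (fun total line =>
    let winning : PySem.Set String :=
      PySem.Set.ofList (PySem.Str.split₀ (PySem.List.pyGetD (pvFields line) 0 ""))
    let score :=
      (PySem.Set.ofList (PySem.Str.split₀ (PySem.List.pyGetD (pvFields line) 1 ""))).foldl
        (fun score tok =>
          if PySem.Set.contains winning tok then (if score = 0 then 1 else score * 2) else score)
        (0 : Int)
    total + score) 0

-- ===== PRECONDITION & SPEC =====
-- Pre_ excludes exactly the lines on which A raises IndexError: a line without a ':',
-- or whose segment after the first ':' (up to the next ':' or the end) contains no '|'.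
def Pre_part1 (lines : List String) : Prop :=
  ∀ line ∈ lines,
    (':' : Char) ∈ line.toList ∧
    ('|' : Char) ∈ (((line.toList.dropWhile (fun c => c ≠ ':')).drop 1).takeWhile (fun c => c ≠ ':'))
instance (lines : List String) : Decidable (Pre_part1 lines) := by unfold Pre_part1; infer_instance

def pvWitness_part1 : List String := ["Card 1: 41 48 | 83 48 17", "Card 2: 1 2 | 3 4"]

def Spec_part1 (lines : List String) (out : Int) : Prop := out = part1_alt lines
instance (lines : List String) (out : Int) : Decidable (Spec_part1 lines out) := by unfold Spec_part1; infer_instance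

-- ===== CLAIM (what is proved, stated in full; the proofs are below) =====
def Claim_equal_part1 : Prop := ∀ (lines : List String), Dom_part1 lines → Pre_part1 lines → Spec_part1 lines (part1 lines)

-- ===== LEMMAS AND PROOFS =====

-- the doubling fold from a positive accumulator multiplies by 2 per match
theorem pv_fold_pos (W : PySem.Set String) (l : List String) :
    ∀ c : Int, 0 < c →
      l.foldl (fun score tok =>
        if PySem.Set.contains W tok then (if score = 0 then 1 else score * 2) else score) c
      = c * 2 ^ (l.filter (fun t => PySem.Set.contains W t)).length := by
  induction l with
  | nil => intro c hc; simp
  | cons x l ih =>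
    intro c hc
    by_cases hx : PySem.Set.contains W x
    · rw [List.foldl_cons, if_pos hx, if_neg (by omega : c ≠ 0),
        List.filter_cons_of_pos hx, ih (c * 2) (by omega), List.length_cons, pow_succ]
      ring
    · rw [List.foldl_cons, if_neg hx,
        List.filter_cons_of_neg (by simpa using hx)]
      exact ih c hc

-- the doubling fold from 0 computes the closed-form score
theorem pv_fold_score (W : PySem.Set String) (l : List String) :
    l.foldl (fun score tok =>
      if PySem.Set.contains W tok then (if score = 0 then 1 else score * 2) else score) (0 : Int)
    = (if (l.filter (fun t => PySem.Set.contains W t)).length = 0 then 0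
       else 2 ^ ((l.filter (fun t => PySem.Set.contains W t)).length - 1)) := by
  induction l with
  | nil => simp
  | cons x l ih =>
    by_cases hx : PySem.Set.contains W x
    · rw [List.foldl_cons, if_pos hx, if_pos rfl, List.filter_cons_of_pos hx,
        pv_fold_pos W l 1 (by omega), List.length_cons, one_mul,
        Nat.add_sub_cancel, if_neg (Nat.succ_ne_zero _)]
    · rw [List.foldl_cons, if_neg hx,
        List.filter_cons_of_neg (by simpa using hx)]
      exact ih

-- filtering the own-number set by the winning set counts the same elements as set intersection
theorem pv_count_eq (xs ys : List String) :
    ((PySem.Set.ofList ys).filter (fun t => PySem.Set.contains (PySem.Set.ofList xs) t)).length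
    = (PySem.Set.inter (PySem.Set.ofList xs) (PySem.Set.ofList ys)).length := by
  apply List.Perm.length_eq
  rw [List.perm_ext_iff_of_nodup
    ((PySem.Set.nodup_ofList ys).filter _)
    (PySem.Set.nodup_inter _ _ (PySem.Set.nodup_ofList xs))]
  intro a
  simp only [List.mem_filter, PySem.Set.mem_inter, PySem.Set.mem_ofList,
    PySem.Set.contains_iff]
  tauto

-- per-line agreement of the two step functions
theorem pv_step_eq (v : Int) (xs ys : List String) :
    (if PySem.Set.inter (PySem.Set.ofList xs) (PySem.Set.ofList ys) ≠ [] then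
       v + 2 ^ ((PySem.Set.inter (PySem.Set.ofList xs) (PySem.Set.ofList ys)).length - 1)
     else v)
    = v + (PySem.Set.ofList ys).foldl
        (fun score tok =>
          if PySem.Set.contains (PySem.Set.ofList xs) tok then
            (if score = 0 then 1 else score * 2) else score) (0 : Int) := by
  rw [pv_fold_score, pv_count_eq]
  by_cases h : PySem.Set.inter (PySem.Set.ofList xs) (PySem.Set.ofList ys) = []
  · rw [if_neg (by simpa using h), if_pos (by simp [h])]
    simp
  · have hl : (PySem.Set.inter (PySem.Set.ofList xs) (PySem.Set.ofList ys)).length ≠ 0 := by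
      simpa [List.length_eq_zero_iff] using h
    rw [if_pos h, if_neg hl]

-- the two per-line step functions agree, so the two folds agree
theorem pv_fold_lines (l : List String) : ∀ v : Int,
    l.foldl (fun value line =>
      let winning_nums : PySem.Set String :=
        PySem.Set.ofList (PySem.Str.split₀ (PySem.List.pyGetD (pvFields line) 0 ""))
      let nums : PySem.Set String :=
        PySem.Set.ofList (PySem.Str.split₀ (PySem.List.pyGetD (pvFields line) 1 ""))
      let actual_wins := PySem.Set.inter winning_nums nums
      if actual_wins ≠ [] then value + 2 ^ (actual_wins.length - 1) else value) v
    = l.foldl (fun total line =>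
      let winning : PySem.Set String :=
        PySem.Set.ofList (PySem.Str.split₀ (PySem.List.pyGetD (pvFields line) 0 ""))
      let score :=
        (PySem.Set.ofList (PySem.Str.split₀ (PySem.List.pyGetD (pvFields line) 1 ""))).foldl
          (fun score tok =>
            if PySem.Set.contains winning tok then (if score = 0 then 1 else score * 2) else score)
          (0 : Int)
      total + score) v := by
  intro v
  simp only [pv_step_eq]

-- ===== VERDICT (by name: the statement is the Claim_ definition above) =====
theorem part1_spec : Claim_equal_part1 := by
  intro lines _ _
  unfold Spec_part1 part1 part1_alt
  exact pv_fold_lines lines 0
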